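-- pv_equiv track=rewrite | github.com/NieznanywInternetach/other_files | unittests_and_algorithms.py | mandragora
-- ===== SOURCE A (Python) =====
-- from itertools import product
--
-- def mandragora(health_data: list[int]):
--     all_actions = product('be', repeat=len(health_data))
--     highest_exp = 0
--     for actions in all_actions:
--         exp = 0
--         health_player = 1
--         for health_mandragora, action in zip(sorted(health_data), actions):
--             if action == 'e':
--                 health_player += 1
--             else:
--                 exp += health_player * health_mandragora
--         if exp > highest_exp:
--             highest_exp = exp
--     return highest_exp
-- ===== SOURCE B (Python) =====
-- def mandragora(health_data):
--     # sort ascending; the best plan eats some prefix of the sorted list and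
--     # battles the rest: try every split k, candidate = (k+1) * suffix_sum(k).
--     best = 0
--     s = sum(health_data)
--     p = 1
--     for h in sorted(health_data):
--         best = max(best, p * s)
--         s -= h
--         p += 1
--     return best
-- ===== Notes on version B (the rewrite author's own statement) =====
-- stated objective: faster
-- what changed: Replaces the 2^n enumeration of all eat/battle action tuples by a sort plus one suffix-sum sweep: the optimum eats a prefix of the ascending-sorted list, so B takes the max over split points k of (k+1)*suffix_sum(k).
import Mathlib
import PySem

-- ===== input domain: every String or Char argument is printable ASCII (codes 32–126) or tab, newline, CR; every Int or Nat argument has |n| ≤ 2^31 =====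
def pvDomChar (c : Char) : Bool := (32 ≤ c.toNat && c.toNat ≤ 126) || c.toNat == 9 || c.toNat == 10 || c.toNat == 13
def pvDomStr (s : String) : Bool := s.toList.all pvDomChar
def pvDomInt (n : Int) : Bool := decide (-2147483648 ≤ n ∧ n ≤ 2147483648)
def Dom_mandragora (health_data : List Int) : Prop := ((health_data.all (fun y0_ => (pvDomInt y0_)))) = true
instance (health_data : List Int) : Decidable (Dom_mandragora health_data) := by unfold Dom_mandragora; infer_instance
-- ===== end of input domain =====

-- B replaces A's 2^n enumeration of eat/battle tuples by a sort + one suffix-sum sweep (objective: faster).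

-- ===== PORT A =====
-- itertools.product('be', repeat=n): all length-n tuples over 'b','e', first coordinate varying slowest
def pvProdBE : Nat → List (List Char)
  | 0 => [[]]
  | n + 1 => ['b', 'e'].flatMap (fun c => (pvProdBE n).map (fun rest => c :: rest))

-- one step of A's inner loop over zip(sorted(health_data), actions), state (exp, health_player)
def pvStepA (st : Int × Int) (pa : Int × Char) : Int × Int :=
  if pa.2 == 'e' then (st.1, st.2 + 1) else (st.1 + st.2 * pa.1, st.2)

-- exp computed by A's inner loop (health_player starts at p)
def pvExp (p : Int) (l : List Int) (acts : List Char) : Int :=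
  ((l.zip acts).foldl pvStepA (0, p)).1

def mandragora (health_data : List Int) : Int :=
  (pvProdBE health_data.length).foldl
    (fun highest_exp actions =>
      let exp := pvExp 1 (PySem.List.sorted health_data (fun x => x) false) actions
      if exp > highest_exp then exp else highest_exp) 0

-- ===== PORT B =====
-- one step of B's loop: best = max(best, p*s); s -= h; p += 1   (state (best, s, p))
def pvStepB (st : Int × Int × Int) (h : Int) : Int × Int × Int :=
  (max st.1 (st.2.2 * st.2.1), st.2.1 - h, st.2.2 + 1)

def mandragora_alt (health_data : List Int) : Int :=
  ((PySem.List.sorted health_data (fun x => x) false).foldl pvStepB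
    (0, health_data.sum, 1)).1

-- ===== PRECONDITION & SPEC =====
def Spec_mandragora (health_data : List Int) (out : Int) : Prop := out = mandragora_alt health_data
instance (health_data : List Int) (out : Int) : Decidable (Spec_mandragora health_data out) := by unfold Spec_mandragora; infer_instance

-- ===== CLAIM (what is proved, stated in full; the proofs are below) =====
def Claim_equal_mandragora : Prop := ∀ (health_data : List Int), Dom_mandragora health_data → Spec_mandragora health_data (mandragora health_data)

-- ===== LEMMAS AND PROOFS =====

-- the optimum of A's search, as a recursion: battle the head or eat the head
def bestRec : Int → List Int → Int
  | _, [] => 0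
  | p, h :: t => max (p * h + bestRec p t) (bestRec (p + 1) t)

-- the optimum over "eat a prefix" plans: M p l = max over k of (p+k) * sum(drop k l)
def sufMax : Int → List Int → Int
  | _, [] => 0
  | p, h :: t => max (p * (h + t.sum)) (sufMax (p + 1) t)

theorem pvExp_shift (z : List (Int × Char)) : ∀ (e p : Int),
    (z.foldl pvStepA (e, p)).1 = e + (z.foldl pvStepA (0, p)).1 := by
  induction z with
  | nil => intro e p; simp
  | cons a z ih =>
      intro e p
      simp only [List.foldl_cons, pvStepA]
      by_cases hc : a.2 == 'e'
      · rw [if_pos hc, if_pos hc]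
        exact ih e (p + 1)
      · rw [if_neg hc, if_neg hc]
        rw [ih (e + p * a.1) p, ih (0 + p * a.1) p]
        ring

theorem foldl_prodBE (l : List Int) : ∀ (p b c : Int),
    (pvProdBE l.length).foldl
      (fun hi acts => let e := c + pvExp p l acts; if e > hi then e else hi) b
      = max b (c + bestRec p l) := by
  induction l with
  | nil =>
      intro p b c
      simp only [List.length_nil, pvProdBE, List.foldl_cons, List.foldl_nil]
      simp only [pvExp, List.zip_nil_left, List.foldl_nil, bestRec]
      split <;> omega
  | cons h t ih =>
      intro p b c
      have hb : ∀ (acts : List Char), pvExp p (h :: t) ('b' :: acts) = p * h + pvExp p t acts := by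
        intro acts
        simp only [pvExp, List.zip_cons_cons, List.foldl_cons, pvStepA]
        simp only [Char.reduceBEq, Bool.false_eq_true, if_false, zero_add]
        exact pvExp_shift _ _ _
      have he : ∀ (acts : List Char), pvExp p (h :: t) ('e' :: acts) = pvExp (p + 1) t acts := by
        intro acts
        simp [pvExp, List.zip_cons_cons, List.foldl_cons, pvStepA]
      simp only [List.length_cons, pvProdBE, List.flatMap_cons, List.flatMap_nil,
        List.append_nil, List.foldl_append, List.foldl_map]
      have e1 : (fun (hi : Int) (acts : List Char) =>
            let e := c + pvExp p (h :: t) ('b' :: acts); if e > hi then e else hi)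
          = (fun hi acts => let e := (c + p * h) + pvExp p t acts; if e > hi then e else hi) := by
        funext hi acts; simp only [hb, add_assoc]
      have e2 : (fun (hi : Int) (acts : List Char) =>
            let e := c + pvExp p (h :: t) ('e' :: acts); if e > hi then e else hi)
          = (fun hi acts => let e := c + pvExp (p + 1) t acts; if e > hi then e else hi) := by
        funext hi acts; simp only [he]
      rw [e1, e2, ih p b (c + p * h), ih (p + 1) (max b (c + p * h + bestRec p t)) c]
      simp only [bestRec]
      omega

theorem sufMax_ge (t : List Int) : ∀ (p : Int) (k : Nat), k ≤ t.length →
    (p + (k : Int)) * (t.drop k).sum ≤ sufMax p t := by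
  induction t with
  | nil =>
      intro p k hk
      have hk0 : k = 0 := by simpa using hk
      subst hk0
      simp [sufMax]
  | cons h u ih =>
      intro p k hk
      cases k with
      | zero =>
          simp only [Nat.cast_zero, add_zero, List.drop_zero, List.sum_cons, sufMax]
          exact le_max_left _ _
      | succ j =>
          have hj : j ≤ u.length := by simpa using hk
          have := ih (p + 1) j hj
          simp only [List.drop_succ_cons, sufMax]
          have harith : (p + ((j : Int) + 1)) = (p + 1 + (j : Int)) := by ring
          push_cast
          rw [harith]
          exact le_trans this (le_max_right _ _)

theorem sufMax_exists (t : List Int) : ∀ (p : Int),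
    ∃ k, k ≤ t.length ∧ sufMax p t = (p + (k : Int)) * (t.drop k).sum := by
  induction t with
  | nil => intro p; exact ⟨0, by simp [sufMax]⟩
  | cons h u ih =>
      intro p
      rcases le_total (sufMax (p + 1) u) (p * (h + u.sum)) with hle | hle
      · refine ⟨0, by simp, ?_⟩
        simp only [sufMax, List.drop_zero, List.sum_cons, Nat.cast_zero, add_zero]
        exact max_eq_left hle
      · rcases ih (p + 1) with ⟨j, hj, hev⟩
        refine ⟨j + 1, by simpa using Nat.succ_le_succ hj, ?_⟩
        simp only [sufMax, List.drop_succ_cons]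
        rw [max_eq_right hle, hev]
        push_cast
        ring_nf

theorem sum_take_ge (t : List Int) : ∀ (h : Int) (k : Nat), (∀ x ∈ t, h ≤ x) → k ≤ t.length →
    (k : Int) * h ≤ (t.take k).sum := by
  induction t with
  | nil =>
      intro h k _ hk
      have hk0 : k = 0 := by simpa using hk
      subst hk0
      simp
  | cons a u ih =>
      intro h k hall hk
      cases k with
      | zero => simp
      | succ j =>
          have hj : j ≤ u.length := by simpa using hk
          have ha : h ≤ a := hall a (by simp)
          have := ih h j (fun x hx => hall x (by simp [hx])) hj
          simp only [List.take_succ_cons, List.sum_cons]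
          push_cast
          nlinarith

-- exchange argument: on an ascending list the optimum is an eat-prefix plan
theorem bestRec_eq_sufMax (l : List Int) (hs : l.Pairwise (· ≤ ·)) :
    ∀ (p : Int), 1 ≤ p → bestRec p l = sufMax p l := by
  induction l with
  | nil => intro p _; rfl
  | cons h t ih =>
      intro p hp
      have hhead : ∀ x ∈ t, h ≤ x := (List.pairwise_cons.mp hs).1
      have htail : t.Pairwise (· ≤ ·) := (List.pairwise_cons.mp hs).2
      have ih1 := ih htail p hp
      have ih2 := ih htail (p + 1) (by omega)
      simp only [bestRec, sufMax, ih1, ih2]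
      apply le_antisymm
      · refine max_le ?_ (le_max_right _ _)
        rcases sufMax_exists t p with ⟨k, hk, hev⟩
        rw [hev]
        set S : Int := (t.drop k).sum with hS
        rcases le_total (p * h) S with hcase | hcase
        · refine le_trans ?_ (le_max_right _ _)
          have := sufMax_ge t (p + 1) k hk
          rw [← hS] at this
          nlinarith
        · refine le_trans ?_ (le_max_left _ _)
          have hsum : t.sum = (t.take k).sum + S := by
            rw [hS, ← List.sum_append, List.take_append_drop]
          have htake : (k : Int) * h ≤ (t.take k).sum := sum_take_ge t h k hhead hk
          have hk0 : (0 : Int) ≤ (k : Int) := Int.natCast_nonneg k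
          nlinarith
      · refine max_le ?_ (le_max_right _ _)
        have h0 : p * t.sum ≤ sufMax p t := by
          have := sufMax_ge t p 0 (Nat.zero_le _)
          simpa using this
        refine le_trans ?_ (le_max_left _ _)
        nlinarith [h0]

theorem foldl_stepB (l : List Int) : ∀ (b s p : Int), 0 ≤ b → s = l.sum →
    (l.foldl pvStepB (b, s, p)).1 = max b (sufMax p l) := by
  induction l with
  | nil => intro b s p hb _; simp [sufMax]; omega
  | cons h t ih =>
      intro b s p hb hsum
      simp only [List.foldl_cons, pvStepB]
      rw [ih (max b (p * s)) (s - h) (p + 1) (le_trans hb (le_max_left _ _))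
        (by simp [List.sum_cons] at hsum; omega)]
      simp only [sufMax]
      have hsv : s = h + t.sum := by simpa [List.sum_cons] using hsum
      rw [← hsv]
      omega

-- ===== VERDICT (by name: the statement is the Claim_ definition above) =====
theorem mandragora_spec : Claim_equal_mandragora := by
  intro health_data _
  unfold Spec_mandragora
  set asc := PySem.List.sorted health_data (fun x => x) false with hasc
  have hperm : asc.Perm health_data := PySem.List.sorted_perm _ _ _
  have hpw : asc.Pairwise (· ≤ ·) := by
    have := PySem.List.sorted_pairwise (xs := health_data) (key := fun x => x)
    simpa [hasc] using this
  have hlen : health_data.length = asc.length := (hperm.length_eq).symm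
  have hsum : health_data.sum = asc.sum := (hperm.sum_eq).symm
  have hA : mandragora health_data = max 0 (bestRec 1 asc) := by
    unfold mandragora
    rw [← hasc, hlen]
    have := foldl_prodBE asc 1 0 0
    simpa using this
  have hB : mandragora_alt health_data = max 0 (sufMax 1 asc) := by
    unfold mandragora_alt
    rw [← hasc, hsum]
    exact foldl_stepB asc 0 asc.sum 1 le_rfl rfl
  rw [hA, hB, bestRec_eq_sufMax asc hpw 1 le_rfl]
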